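-- pv_equiv track=rewrite | github.com/HalfSilent/coc7e-TV1 | CoCGame/editor/editor_mapa.py | _celulas_retangulo
-- ===== SOURCE A (Python) =====
-- from typing import Dict, List, Optional, Tuple
--
-- def _celulas_retangulo(c0: int, l0: int,
--                        c1: int, l1: int) -> List[Tuple[int, int]]:
--     cmin, cmax = min(c0, c1), max(c0, c1)
--     lmin, lmax = min(l0, l1), max(l0, l1)
--     cels = []
--     for l in range(lmin, lmax + 1):
--         for c in range(cmin, cmax + 1):
--             if c in (cmin, cmax) or l in (lmin, lmax):
--                 cels.append((c, l))
--     return cels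
-- ===== SOURCE B (Python) =====
-- from typing import Dict, List, Optional, Tuple
--
-- def _celulas_retangulo(c0: int, l0: int,
--                        c1: int, l1: int) -> List[Tuple[int, int]]:
--     cmin, cmax = min(c0, c1), max(c0, c1)
--     lmin, lmax = min(l0, l1), max(l0, l1)
--     cols = (cmin,) if cmin == cmax else (cmin, cmax)
--     top = [(c, lmin) for c in range(cmin, cmax + 1)]
--     if lmin == lmax:
--         return top
--     middle = [(c, l) for l in range(lmin + 1, lmax) for c in cols]
--     bottom = [(c, lmax) for c in range(cmin, cmax + 1)]
--     return top + middle + bottom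
-- ===== Notes on version B (the rewrite author's own statement) =====
-- stated objective: faster
-- what changed: B emits the top row, two edge cells per middle row, and the bottom row directly instead of scanning every interior cell of the rectangle and testing whether it lies on the border.
import Mathlib
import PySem

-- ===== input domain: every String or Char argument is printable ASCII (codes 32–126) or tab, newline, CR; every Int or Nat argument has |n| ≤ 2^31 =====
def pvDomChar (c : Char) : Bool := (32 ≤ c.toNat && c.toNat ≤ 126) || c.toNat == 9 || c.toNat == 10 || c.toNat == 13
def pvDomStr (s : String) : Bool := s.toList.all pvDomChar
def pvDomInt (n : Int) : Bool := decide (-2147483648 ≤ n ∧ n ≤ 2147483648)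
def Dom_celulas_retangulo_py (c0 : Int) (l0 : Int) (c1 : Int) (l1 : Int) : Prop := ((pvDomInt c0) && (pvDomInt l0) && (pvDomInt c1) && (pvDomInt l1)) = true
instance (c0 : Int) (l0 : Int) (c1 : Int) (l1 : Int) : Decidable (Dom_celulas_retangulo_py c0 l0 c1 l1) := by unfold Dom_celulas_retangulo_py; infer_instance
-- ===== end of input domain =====

-- B emits the border rows/edge cells directly (O(W+H)) instead of scanning the whole W*H rectangle; same return value.


-- ===== PORT A =====
def celulas_retangulo_py (c0 : Int) (l0 : Int) (c1 : Int) (l1 : Int) : List (Int × Int) :=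
  let cmin := min c0 c1
  let cmax := max c0 c1
  let lmin := min l0 l1
  let lmax := max l0 l1
  (PySem.List.pyRange lmin (lmax + 1) 1).foldl (fun cels l =>
    (PySem.List.pyRange cmin (cmax + 1) 1).foldl (fun cels c =>
      if c = cmin ∨ c = cmax ∨ l = lmin ∨ l = lmax then cels ++ [(c, l)] else cels) cels) []

-- ===== PORT B =====
def celulas_retangulo_py_alt (c0 : Int) (l0 : Int) (c1 : Int) (l1 : Int) : List (Int × Int) :=
  let cmin := min c0 c1
  let cmax := max c0 c1
  let lmin := min l0 l1
  let lmax := max l0 l1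
  let cols : List Int := if cmin = cmax then [cmin] else [cmin, cmax]
  let top := (PySem.List.pyRange cmin (cmax + 1) 1).map (fun c => (c, lmin))
  if lmin = lmax then top
  else
    let middle := (PySem.List.pyRange (lmin + 1) lmax 1).flatMap (fun l => cols.map (fun c => (c, l)))
    let bottom := (PySem.List.pyRange cmin (cmax + 1) 1).map (fun c => (c, lmax))
    top ++ middle ++ bottom

-- ===== PRECONDITION & SPEC =====
def Spec_celulas_retangulo_py (c0 : Int) (l0 : Int) (c1 : Int) (l1 : Int) (out : List (Int × Int)) : Prop := out = celulas_retangulo_py_alt c0 l0 c1 l1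
instance (c0 : Int) (l0 : Int) (c1 : Int) (l1 : Int) (out : List (Int × Int)) : Decidable (Spec_celulas_retangulo_py c0 l0 c1 l1 out) := by unfold Spec_celulas_retangulo_py; infer_instance

-- ===== CLAIM (what is proved, stated in full; the proofs are below) =====
def Claim_equal_celulas_retangulo_py : Prop := ∀ (c0 : Int) (l0 : Int) (c1 : Int) (l1 : Int), Dom_celulas_retangulo_py c0 l0 c1 l1 → Spec_celulas_retangulo_py c0 l0 c1 l1 (celulas_retangulo_py c0 l0 c1 l1)

-- ===== LEMMAS AND PROOFS =====

-- Each middle row of A's scan keeps exactly the edge columns; the border rows keep everything.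
theorem celulas_retangulo_main (cmin cmax lmin lmax : Int) (hc : cmin ≤ cmax) (hl : lmin ≤ lmax) :
    (PySem.List.pyRange lmin (lmax + 1) 1).foldl (fun cels l =>
      (PySem.List.pyRange cmin (cmax + 1) 1).foldl (fun cels c =>
        if c = cmin ∨ c = cmax ∨ l = lmin ∨ l = lmax then cels ++ [(c, l)] else cels) cels) []
    =
    (let cols : List Int := if cmin = cmax then [cmin] else [cmin, cmax]
     let top := (PySem.List.pyRange cmin (cmax + 1) 1).map (fun c => (c, lmin))
     if lmin = lmax then top
     else
       let middle := (PySem.List.pyRange (lmin + 1) lmax 1).flatMap (fun l => cols.map (fun c => (c, l)))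
       let bottom := (PySem.List.pyRange cmin (cmax + 1) 1).map (fun c => (c, lmax))
       top ++ middle ++ bottom) := by
  -- inner fold of A appends the filtered row
  have hinner : ∀ (l : Int) (acc : List (Int × Int)),
      (PySem.List.pyRange cmin (cmax + 1) 1).foldl (fun cels c =>
        if c = cmin ∨ c = cmax ∨ l = lmin ∨ l = lmax then cels ++ [(c, l)] else cels) acc
      = acc ++ ((PySem.List.pyRange cmin (cmax + 1) 1).filter
          (fun c => decide (c = cmin ∨ c = cmax ∨ l = lmin ∨ l = lmax))).map (fun c => (c, l)) := by
    intro l acc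
    simpa only [decide_eq_true_eq] using
      PySem.List.foldl_append_if
        (p := fun c => decide (c = cmin ∨ c = cmax ∨ l = lmin ∨ l = lmax))
        (f := fun c => (c, l)) (l := PySem.List.pyRange cmin (cmax + 1) 1) (acc := acc)
  -- border rows: the filter keeps everything
  have hrow_border : ∀ (l : Int), l = lmin ∨ l = lmax →
      ((PySem.List.pyRange cmin (cmax + 1) 1).filter
          (fun c => decide (c = cmin ∨ c = cmax ∨ l = lmin ∨ l = lmax))).map (fun c => (c, l))
      = (PySem.List.pyRange cmin (cmax + 1) 1).map (fun c => (c, l)) := by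
    intro l hb
    congr 1
    apply List.filter_eq_self.mpr
    intro c _
    rcases hb with h | h <;> simp [h]
  -- middle rows: the filter keeps exactly the edge columns
  have hrow_mid : ∀ (l : Int), lmin < l → l < lmax →
      ((PySem.List.pyRange cmin (cmax + 1) 1).filter
          (fun c => decide (c = cmin ∨ c = cmax ∨ l = lmin ∨ l = lmax))).map (fun c => (c, l))
      = (if cmin = cmax then [cmin] else [cmin, cmax]).map (fun c => (c, l)) := by
    intro l h1 h2
    by_cases hcc : cmin = cmax
    · subst hcc
      rw [PySem.List.pyRange_one_singleton, if_pos rfl]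
      rw [List.filter_cons_of_pos (by simp), List.filter_nil]
    · have hlt : cmin < cmax := lt_of_le_of_ne hc hcc
      have hmidnil : (PySem.List.pyRange (cmin + 1) cmax 1).filter
          (fun c => decide (c = cmin ∨ c = cmax ∨ l = lmin ∨ l = lmax)) = [] := by
        apply List.filter_eq_nil_iff.mpr
        intro c hcmem
        have hm := PySem.List.mem_pyRange_one.mp hcmem
        simp only [decide_eq_true_eq, not_or]
        omega
      rw [PySem.List.pyRange_one_cons (by omega : cmin < cmax + 1),
          PySem.List.pyRange_one_succ_right (by omega : cmin + 1 ≤ cmax)]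
      rw [if_neg hcc]
      rw [List.filter_cons_of_pos (by simp), List.filter_append, hmidnil,
          List.filter_cons_of_pos (by simp), List.filter_nil, List.nil_append]
  -- rewrite A to a flatMap over rows
  have hAfold : (PySem.List.pyRange lmin (lmax + 1) 1).foldl (fun cels l =>
      (PySem.List.pyRange cmin (cmax + 1) 1).foldl (fun cels c =>
        if c = cmin ∨ c = cmax ∨ l = lmin ∨ l = lmax then cels ++ [(c, l)] else cels) cels) []
    = (PySem.List.pyRange lmin (lmax + 1) 1).foldl (fun cels l => cels ++
        ((PySem.List.pyRange cmin (cmax + 1) 1).filter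
          (fun c => decide (c = cmin ∨ c = cmax ∨ l = lmin ∨ l = lmax))).map (fun c => (c, l))) [] :=
    PySem.List.foldl_congr_mem _ _ _ _ (by intro acc l _; exact hinner l acc)
  rw [hAfold, PySem.List.foldl_append_eq_flatMap]
  by_cases heq : lmin = lmax
  · subst heq
    rw [if_pos rfl, PySem.List.pyRange_one_singleton (a := lmin)]
    simp
  · rw [if_neg heq]
    have hlt : lmin < lmax := lt_of_le_of_ne hl heq
    rw [PySem.List.pyRange_one_cons (by omega : lmin < lmax + 1),
        PySem.List.pyRange_one_succ_right (by omega : lmin + 1 ≤ lmax)]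
    rw [List.flatMap_cons, List.flatMap_append]
    have hmid : (PySem.List.pyRange (lmin + 1) lmax 1).flatMap (fun l =>
        ((PySem.List.pyRange cmin (cmax + 1) 1).filter
          (fun c => decide (c = cmin ∨ c = cmax ∨ l = lmin ∨ l = lmax))).map (fun c => (c, l)))
      = (PySem.List.pyRange (lmin + 1) lmax 1).flatMap (fun l =>
          (if cmin = cmax then [cmin] else [cmin, cmax]).map (fun c => (c, l))) := by
      apply List.flatMap_congr
      intro l hlm
      have hm := PySem.List.mem_pyRange_one.mp hlm
      exact hrow_mid l (by omega) (by omega)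
    rw [hmid]
    simp [List.append_assoc]

-- ===== VERDICT (by name: the statement is the Claim_ definition above) =====
theorem celulas_retangulo_py_spec : Claim_equal_celulas_retangulo_py := by
  intro c0 l0 c1 l1 _
  unfold Spec_celulas_retangulo_py celulas_retangulo_py celulas_retangulo_py_alt
  exact celulas_retangulo_main _ _ _ _ (min_le_max) (min_le_max)
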